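-- pv_equiv track=rewrite | github.com/jwhitham/spdif-bit-exactness-tools | bmc.py | bmc_encoder
-- ===== SOURCE A (Python) =====
-- def bmc_encoder(data, hold_time):
--     data2 = ""
--     current = True
--     for i in range(len(data)):
--         for j in range(hold_time):
--             data2 += ("1" if current else "0")
--         if data[i] == "1":
--             current = not current
--         for j in range(hold_time):
--             data2 += ("1" if current else "0")
--         current = not current
--
--     return data2
-- ===== SOURCE B (Python) =====
-- def bmc_encoder(data, hold_time):
--     # run-length table: a '1' bit gives two half-cell runs, anything else one full-cell run
--     runs = []
--     for c in data:
--         if c == "1":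
--             runs.append(hold_time)
--             runs.append(hold_time)
--         else:
--             runs.append(2 * hold_time)
--     # BMC levels strictly alternate run by run, starting at '1'
--     return "".join(("1" if i % 2 == 0 else "0") * n for i, n in enumerate(runs))
-- ===== Notes on version B (the rewrite author's own statement) =====
-- stated objective: alternative
-- what changed: B builds a run-length table (two half-runs per '1' bit, one double run per other char) and emits each run's level purely from the run index parity, instead of A's per-character inner loops threading a 'current' boolean.
import Mathlib
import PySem

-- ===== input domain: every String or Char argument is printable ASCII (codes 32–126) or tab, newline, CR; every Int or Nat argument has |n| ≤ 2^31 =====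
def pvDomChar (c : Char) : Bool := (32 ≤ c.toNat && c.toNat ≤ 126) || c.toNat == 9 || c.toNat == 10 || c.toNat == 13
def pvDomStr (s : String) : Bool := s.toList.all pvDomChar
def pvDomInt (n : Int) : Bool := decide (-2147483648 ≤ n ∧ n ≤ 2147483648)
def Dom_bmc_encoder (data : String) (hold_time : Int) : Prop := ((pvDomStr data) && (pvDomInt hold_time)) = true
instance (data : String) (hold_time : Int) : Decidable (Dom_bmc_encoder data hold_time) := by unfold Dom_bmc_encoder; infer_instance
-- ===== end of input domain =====

-- B replaces A's per-character loops threading a `current` boolean by a run-length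
-- table whose levels are read off the run index parity (objective: alternative).


-- ===== PORT A =====
-- literal transliteration of A: per character, two inner range(hold_time) loops
-- appending the level char one at a time, threading (data2, current)
def bmc_encoder (data : String) (hold_time : Int) : String :=
  let r := data.toList.foldl
    (fun (st : List Char × Bool) (c : Char) =>
      let data2 := (PySem.List.pyRange 0 hold_time 1).foldl
        (fun acc _ => acc ++ [if st.2 then '1' else '0']) st.1
      let current := if c == '1' then !st.2 else st.2
      let data2 := (PySem.List.pyRange 0 hold_time 1).foldl
        (fun acc _ => acc ++ [if current then '1' else '0']) data2
      (data2, !current))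
    ([], true)
  String.ofList r.1

-- ===== PORT B =====
-- transliteration of B: build the run-length list, then emit each run from its index parity
def bmc_encoder_alt (data : String) (hold_time : Int) : String :=
  let runs : List Int := data.toList.foldl
    (fun rs c => if c == '1' then rs ++ [hold_time, hold_time] else rs ++ [2 * hold_time]) []
  String.ofList ((PySem.List.enumerate runs 0).foldl
    (fun acc (p : Int × Int) =>
      acc ++ List.replicate p.2.toNat (if p.1 % 2 == 0 then '1' else '0')) [])

-- ===== PRECONDITION & SPEC =====
def Spec_bmc_encoder (data : String) (hold_time : Int) (out : String) : Prop := out = bmc_encoder_alt data hold_time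
instance (data : String) (hold_time : Int) (out : String) : Decidable (Spec_bmc_encoder data hold_time out) := by unfold Spec_bmc_encoder; infer_instance

-- ===== CLAIM (what is proved, stated in full; the proofs are below) =====
def Claim_equal_bmc_encoder : Prop := ∀ (data : String) (hold_time : Int), Dom_bmc_encoder data hold_time → Spec_bmc_encoder data hold_time (bmc_encoder data hold_time)

-- ===== LEMMAS AND PROOFS =====

-- parity of a run index = A's `current` boolean at the start of that run
def pvEven (i : Int) : Bool := i % 2 == 0

-- level of run number i
def pvLvl (i : Int) : Char := if pvEven i then '1' else '0'

-- reference rendering: runs rendered from index i with alternating levels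
def pvRender (i : Int) : List Int → List Char
  | [] => []
  | n :: rs => List.replicate n.toNat (pvLvl i) ++ pvRender (i + 1) rs

-- reference run list of the remaining characters
def pvRuns (h : Int) : List Char → List Int
  | [] => []
  | c :: cs => (if c == '1' then [h, h] else [2 * h]) ++ pvRuns h cs

-- A's loop body, let-free (definitionally equal to the port's lambda)
def pvStep (h : Int) (st : List Char × Bool) (c : Char) : List Char × Bool :=
  ((PySem.List.pyRange 0 h 1).foldl
      (fun a _ => a ++ [if (if c == '1' then !st.2 else st.2) then '1' else '0'])
      ((PySem.List.pyRange 0 h 1).foldl (fun a _ => a ++ [if st.2 then '1' else '0']) st.1),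
   !(if c == '1' then !st.2 else st.2))

theorem pvEven_succ (i : Int) : pvEven (i + 1) = !(pvEven i) := by
  rcases Int.emod_two_eq_zero_or_one i with h | h <;>
    · unfold pvEven
      have : (i + 1) % 2 = (i % 2 + 1) % 2 := by omega
      rw [this, h]
      simp

theorem pvA_loop (h : Int) (cs : List Char) : ∀ (i : Int) (acc : List Char),
    cs.foldl (pvStep h) (acc, pvEven i)
      = (acc ++ pvRender i (pvRuns h cs), pvEven (i + (pvRuns h cs).length)) := by
  induction cs with
  | nil => simp [pvRuns, pvRender]
  | cons c cs ih =>
    intro i acc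
    by_cases hc : c == '1'
    · rw [List.foldl_cons]
      rw [show pvStep h (acc, pvEven i) c
            = (acc ++ List.replicate h.toNat (pvLvl i)
                  ++ List.replicate h.toNat (pvLvl (i + 1)), pvEven (i + 1 + 1)) by
        simp [pvStep, PySem.List.length_pyRange_one, hc, pvLvl, pvEven_succ]]
      rw [ih (i + 1 + 1)]
      have hr : pvRuns h (c :: cs) = h :: h :: pvRuns h cs := by simp [pvRuns, hc]
      rw [hr]
      simp only [pvRender, List.length_cons, Prod.mk.injEq, List.append_assoc]
      refine ⟨by simp, ?_⟩
      congr 1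
      push_cast
      ring
    · rw [List.foldl_cons]
      rw [show pvStep h (acc, pvEven i) c
            = (acc ++ List.replicate h.toNat (pvLvl i)
                  ++ List.replicate h.toNat (pvLvl i), pvEven (i + 1)) by
        simp [pvStep, PySem.List.length_pyRange_one, hc, pvLvl, pvEven_succ]]
      rw [ih (i + 1)]
      have hr : pvRuns h (c :: cs) = (2 * h) :: pvRuns h cs := by simp [pvRuns, hc]
      rw [hr]
      simp only [pvRender, List.length_cons, Prod.mk.injEq]
      have h2 : (2 * h).toNat = h.toNat + h.toNat := by omega
      rw [h2, List.replicate_add]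
      refine ⟨by simp [List.append_assoc], ?_⟩
      congr 1
      push_cast
      ring

theorem pvB_runs (h : Int) (cs : List Char) : ∀ (rs : List Int),
    cs.foldl (fun rs c => if c == '1' then rs ++ [h, h] else rs ++ [2 * h]) rs
      = rs ++ pvRuns h cs := by
  induction cs with
  | nil => simp [pvRuns]
  | cons c cs ih =>
    intro rs
    rw [List.foldl_cons, ih]
    by_cases hc : c = '1' <;> simp [pvRuns, hc]

theorem pvB_render (rs : List Int) : ∀ (i : Int) (acc : List Char),
    (PySem.List.enumerate rs i).foldl
      (fun acc (p : Int × Int) =>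
        acc ++ List.replicate p.2.toNat (if p.1 % 2 == 0 then '1' else '0')) acc
      = acc ++ pvRender i rs := by
  induction rs with
  | nil => simp [PySem.List.enumerate_nil, pvRender]
  | cons n rs ih =>
    intro i acc
    rw [PySem.List.enumerate_cons, List.foldl_cons, ih]
    simp [pvRender, pvLvl, pvEven, List.append_assoc]

-- ===== VERDICT (by name: the statement is the Claim_ definition above) =====
theorem bmc_encoder_spec : Claim_equal_bmc_encoder := by
  intro data hold_time _
  unfold Spec_bmc_encoder bmc_encoder bmc_encoder_alt
  have hstep : data.toList.foldl
      (fun (st : List Char × Bool) (c : Char) =>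
        let data2 := (PySem.List.pyRange 0 hold_time 1).foldl
          (fun a _ => a ++ [if st.2 then '1' else '0']) st.1
        let current := if c == '1' then !st.2 else st.2
        let data2 := (PySem.List.pyRange 0 hold_time 1).foldl
          (fun a _ => a ++ [if current then '1' else '0']) data2
        (data2, !current))
      ([], true)
      = data.toList.foldl (pvStep hold_time) ([], pvEven 0) := rfl
  simp only [hstep, pvA_loop hold_time data.toList 0 []]
  rw [pvB_runs hold_time data.toList []]
  simp only [List.nil_append]
  rw [pvB_render (pvRuns hold_time data.toList) 0 []]
  simp only [List.nil_append]
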